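-- pv_equiv track=rewrite | github.com/rubiopenclaw-stack/resume-job-matcher | src/parser.py | infer_roles
-- ===== SOURCE A (Python) =====
-- from typing import Dict, List
--
-- ROLE_KEYWORDS = {
--     'ai engineer': ['ai', 'ml', 'machine learning', 'gpt', 'llm', 'nlp', 'deep learning'],
--     'fullstack': ['react', 'node', 'python', 'javascript', 'typescript', 'fullstack'],
--     'backend': ['python', 'java', 'go', 'rust', 'backend', 'api', 'microservices'],
--     'frontend': ['react', 'vue', 'angular', 'javascript', 'typescript', 'frontend'],
--     'devops': ['docker', 'kubernetes', 'aws', 'gcp', 'devops', 'ci/cd', 'terraform'],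
--     'data engineer': ['python', 'sql', 'data', 'etl', 'spark', 'airflow'],
-- }
--
-- def infer_roles(skills: List[str]) -> List[str]:
--     """根據技能推斷適合的角色"""
--     skills_set = set(skills)
--     matched_roles = []
--
--     for role, required_skills in ROLE_KEYWORDS.items():
--         # 如果有超過一半的技能匹配
--         matches = sum(1 for s in required_skills if s in skills_set)
--         if matches >= len(required_skills) / 2:
--             matched_roles.append(role)
--
--     return matched_roles if matched_roles else ['General Developer']
-- ===== SOURCE B (Python) =====
-- from typing import Dict, List
--
-- ROLE_KEYWORDS = {
--     'ai engineer': ['ai', 'ml', 'machine learning', 'gpt', 'llm', 'nlp', 'deep learning'],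
--     'fullstack': ['react', 'node', 'python', 'javascript', 'typescript', 'fullstack'],
--     'backend': ['python', 'java', 'go', 'rust', 'backend', 'api', 'microservices'],
--     'frontend': ['react', 'vue', 'angular', 'javascript', 'typescript', 'frontend'],
--     'devops': ['docker', 'kubernetes', 'aws', 'gcp', 'devops', 'ci/cd', 'terraform'],
--     'data engineer': ['python', 'sql', 'data', 'etl', 'spark', 'airflow'],
-- }
--
-- # Inverted index, built once at module level: keyword -> roles whose list contains it.
-- _PAIRS = [(kw, role) for role, kws in ROLE_KEYWORDS.items() for kw in kws]
-- _INVERTED: Dict[str, List[str]] = {}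
-- for _kw, _role in _PAIRS:
--     _INVERTED.setdefault(_kw, []).append(_role)
--
--
-- def infer_roles(skills: List[str]) -> List[str]:
--     hits = [role for skill in dict.fromkeys(skills)
--             for role in _INVERTED.get(skill, [])]
--     counts: Dict[str, int] = {}
--     for role in hits:
--         counts[role] = counts.get(role, 0) + 1
--     matched = [role for role, kws in ROLE_KEYWORDS.items()
--                if 2 * counts.get(role, 0) >= len(kws)]
--     return matched or ['General Developer']
-- ===== Notes on version B (the rewrite author's own statement) =====
-- stated objective: alternative
-- what changed: Replaces the per-role scan of keyword lists against a skill set by a module-level inverted index (keyword -> roles) consulted once per distinct input skill, with per-role match counts accumulated in a dict and an integer 2*count >= len threshold.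
import Mathlib
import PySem

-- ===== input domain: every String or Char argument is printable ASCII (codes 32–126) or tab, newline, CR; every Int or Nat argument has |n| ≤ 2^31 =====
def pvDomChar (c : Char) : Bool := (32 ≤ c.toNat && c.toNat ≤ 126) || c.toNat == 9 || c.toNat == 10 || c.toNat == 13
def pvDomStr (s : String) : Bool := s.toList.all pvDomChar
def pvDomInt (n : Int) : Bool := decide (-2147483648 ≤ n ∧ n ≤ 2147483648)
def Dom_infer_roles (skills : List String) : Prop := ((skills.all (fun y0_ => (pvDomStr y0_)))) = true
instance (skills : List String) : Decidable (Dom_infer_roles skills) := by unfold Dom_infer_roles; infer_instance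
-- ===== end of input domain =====

-- B replaces A's per-role scan of keyword lists against the skill set by a precomputed
-- inverted index (keyword -> roles) consulted once per distinct skill, with per-role counts
-- kept in a dict and an integer 2*count >= len threshold (alternative decomposition, not faster).


-- shared module constant ROLE_KEYWORDS (insertion order of the Python dict)
def roleKeywords : List (String × List String) :=
  [("ai engineer", ["ai", "ml", "machine learning", "gpt", "llm", "nlp", "deep learning"]),
   ("fullstack", ["react", "node", "python", "javascript", "typescript", "fullstack"]),
   ("backend", ["python", "java", "go", "rust", "backend", "api", "microservices"]),
   ("frontend", ["react", "vue", "angular", "javascript", "typescript", "frontend"]),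
   ("devops", ["docker", "kubernetes", "aws", "gcp", "devops", "ci/cd", "terraform"]),
   ("data engineer", ["python", "sql", "data", "etl", "spark", "airflow"])]

-- ===== PORT A =====
-- 'matches >= len(required)/2' over Python floats is exact here: both sides are small
-- integers, so it is ported as 2 * matches ≥ len.
def infer_roles (skills : List String) : List String :=
  let skillsSet : PySem.Set String := PySem.Set.ofList skills
  let matched : List String := roleKeywords.foldl (fun acc rk =>
    let nmatch : Int :=
      rk.2.foldl (fun n s => if PySem.Set.contains skillsSet s then n + 1 else n) 0
    if 2 * nmatch ≥ (rk.2.length : Int) then acc ++ [rk.1] else acc) []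
  if matched = [] then ["General Developer"] else matched

-- ===== PORT B =====
-- module-level inverted index: keyword -> list of roles containing it
def invPairs : List (String × String) :=
  roleKeywords.flatMap (fun rk => rk.2.map (fun kw => (kw, rk.1)))

def invIndex : PySem.Dict String (List String) :=
  invPairs.foldl (fun d p => d.modify p.1 [] (fun l => l ++ [p.2])) PySem.Dict.empty

def infer_roles_alt (skills : List String) : List String :=
  let hits : List String :=
    (PySem.List.dedup skills).flatMap (fun skill => invIndex.getD skill [])
  let counts : PySem.Dict String Int :=
    hits.foldl (fun d r => d.modify r 0 (fun c => c + 1)) PySem.Dict.empty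
  let matched : List String :=
    (roleKeywords.filter (fun rk => 2 * counts.getD rk.1 0 ≥ (rk.2.length : Int))).map (fun rk => rk.1)
  if matched = [] then ["General Developer"] else matched

-- ===== PRECONDITION & SPEC =====
def Spec_infer_roles (skills : List String) (out : List String) : Prop := out = infer_roles_alt skills
instance (skills : List String) (out : List String) : Decidable (Spec_infer_roles skills out) := by unfold Spec_infer_roles; infer_instance

-- ===== CLAIM (what is proved, stated in full; the proofs are below) =====
def Claim_equal_infer_roles : Prop := ∀ (skills : List String), Dom_infer_roles skills → Spec_infer_roles skills (infer_roles skills)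

-- ===== LEMMAS AND PROOFS =====

-- one role's block of the inverted pair list, filtered to keyword s, is that role repeated
-- (count of s in its keyword list) times
theorem pv_block_eq (r s : String) (kws : List String) :
    (((kws.map (fun kw => (kw, r))).filter (fun p => p.1 == s)).map Prod.snd)
      = List.replicate (kws.count s) r := by
  induction kws with
  | nil => rfl
  | cons k t ih =>
      by_cases h : k = s
      · subst h
        simp [ih]
        exact List.replicate_succ.symm
      · simp [h, ih]

-- picking the unique entry of a fst-nodup association list
theorem pv_sum_pick (s role : String) (kws : List String) :
    ∀ (L : List (String × List String)), (L.map Prod.fst).Nodup → (role, kws) ∈ L →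
      (L.map (fun rk => if rk.1 == role then rk.2.count s else 0)).sum = kws.count s := by
  intro L
  induction L with
  | nil => simp
  | cons rk t ih =>
      intro hnd hm
      rw [List.map_cons, List.nodup_cons] at hnd
      simp only [List.map_cons, List.sum_cons]
      rcases List.mem_cons.mp hm with h | h
      · subst h
        have hz : (t.map (fun rk => if rk.1 == role then rk.2.count s else 0)).sum = 0 := by
          apply List.sum_eq_zero
          intro x hx
          rcases List.mem_map.mp hx with ⟨rk', hrk', hval⟩
          have hne : rk'.1 ≠ role := by
            intro e
            exact hnd.1 (by simpa [e] using List.mem_map_of_mem (f := Prod.fst) hrk')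
          simpa [hne] using hval.symm
        rw [hz]
        simp
      · have hne : rk.1 ≠ role := by
          intro e
          apply hnd.1
          rw [e]
          simpa using List.mem_map_of_mem (f := Prod.fst) h
        rw [if_neg (by simpa using hne), Nat.zero_add]
        exact ih hnd.2 h

-- role occurs in the inverted-index entry of s exactly (kws.count s) times
theorem pv_count_inv (role : String) (kws : List String)
    (hmem : (role, kws) ∈ roleKeywords) (s : String) :
    (invIndex.getD s []).count role = kws.count s := by
  have h1 : invIndex.getD s [] = (invPairs.filter (fun p => p.1 == s)).map Prod.snd := by
    unfold invIndex
    rw [PySem.Dict.getD_foldl_modify_append]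
    simp [PySem.Dict.getD, PySem.Dict.empty, PySem.Dict.get?]
  rw [h1]
  unfold invPairs
  rw [List.filter_flatMap, List.map_flatMap]
  simp only [pv_block_eq]
  rw [List.count_eq_countP, List.countP_flatMap]
  have h2 : (roleKeywords.map (List.countP (· == role) ∘ fun rk => List.replicate (rk.2.count s) rk.1))
      = roleKeywords.map (fun rk => if rk.1 == role then rk.2.count s else 0) := by
    apply List.map_eq_map_iff.mpr
    intro rk _
    simp only [Function.comp]
    rw [← List.count_eq_countP, List.count_replicate]
  rw [h2]
  exact pv_sum_pick s role kws roleKeywords (by decide) hmem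

-- double counting: summing B-counts over A equals summing A-counts over B
theorem pv_sum_count_comm (A B : List String) :
    (A.map (fun a => B.count a)).sum = (B.map (fun b => A.count b)).sum := by
  induction A with
  | nil => simp
  | cons a t ih =>
      simp only [List.map_cons, List.sum_cons, ih, List.count_cons]
      rw [List.sum_map_add]
      have h3 : (B.map fun b => if a == b then 1 else 0).sum = B.count a := by
        rw [PySem.List.sum_map_ite_one_zero_nat (fun b => a == b) B, List.count_eq_countP]
        exact List.countP_congr (fun b _ => by rw [Bool.beq_comm])
      rw [h3]
      omega

-- the per-role counts of A and B agree: role occurs in the hit list once per distinct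
-- input skill that is one of its keywords, which is A's keywords-in-set tally
theorem pv_counts_agree (skills : List String) (role : String) (kws : List String)
    (hmem : (role, kws) ∈ roleKeywords) :
    ((PySem.List.dedup skills).flatMap (fun sk => invIndex.getD sk [])).count role
      = kws.countP (fun k => PySem.Set.contains (PySem.Set.ofList skills) k) := by
  rw [List.count_eq_countP, List.countP_flatMap]
  have h1 : ((PySem.List.dedup skills).map (List.countP (· == role) ∘ fun sk => invIndex.getD sk []))
      = (PySem.List.dedup skills).map (fun sk => kws.count sk) := by
    apply List.map_eq_map_iff.mpr
    intro sk _
    simp only [Function.comp]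
    rw [← List.count_eq_countP]
    exact pv_count_inv role kws hmem sk
  rw [h1, pv_sum_count_comm]
  have h2 : (kws.map (fun k => (PySem.List.dedup skills).count k))
      = kws.map (fun k => if PySem.Set.contains (PySem.Set.ofList skills) k then 1 else 0) := by
    apply List.map_eq_map_iff.mpr
    intro k _
    rw [List.Nodup.count (PySem.List.nodup_dedup skills)]
    simp [PySem.Set.mem_ofList]
  rw [h2, PySem.List.sum_map_ite_one_zero_nat]

-- Prop-conditioned append-if fold is a filter+map
theorem pv_foldl_append_ite (p : String × List String → Prop) [DecidablePred p]
    (l : List (String × List String)) (acc : List String) :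
    l.foldl (fun acc rk => if p rk then acc ++ [rk.1] else acc) acc
      = acc ++ (l.filter (fun rk => decide (p rk))).map Prod.fst := by
  induction l generalizing acc with
  | nil => simp
  | cons rk t ih =>
      by_cases h : p rk
      · simp [h, ih]
      · simp [h, ih]

-- ===== VERDICT (by name: the statement is the Claim_ definition above) =====
theorem infer_roles_spec : Claim_equal_infer_roles := by
  intro skills _
  show infer_roles skills = infer_roles_alt skills
  unfold infer_roles infer_roles_alt
  dsimp only
  rw [pv_foldl_append_ite, List.nil_append]
  have key : List.filter
        (fun rk => decide (2 * (rk.2.foldl (fun n s => if PySem.Set.contains (PySem.Set.ofList skills) s then n + 1 else n) 0) ≥ (rk.2.length : Int)))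
        roleKeywords
      = List.filter
        (fun rk => decide (2 * ((((PySem.List.dedup skills).flatMap (fun skill => invIndex.getD skill [])).foldl (fun d r => d.modify r 0 (fun c => c + 1)) PySem.Dict.empty).getD rk.1 0) ≥ (rk.2.length : Int)))
        roleKeywords := by
    apply List.filter_congr
    intro rk hrk
    rw [decide_eq_decide, PySem.List.foldl_count_if, ← PySem.Dict.counter_eq_foldl,
        PySem.Dict.getD_counter, pv_counts_agree skills rk.1 rk.2 hrk]
    have he : List.countP (fun k => (PySem.Set.ofList skills).contains k) rk.2
        = List.countP ((PySem.Set.ofList skills).contains) rk.2 := rfl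
    rw [he]
    omega
  rw [key]
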